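-- pv_equiv track=rewrite | github.com/AmirSarrafzadeh/Tkinter | data_analysis/pro.py | print_sequences
-- ===== SOURCE A (Python) =====
-- def print_sequences(all_rows, new_rows):
--     all_combinations = []
--     for start in range(1, all_rows):
--         for end in range(start + 1, all_rows + 1):
--             combination = list(range(start, end))
--             if len(combination) < 3:
--                 continue
--             all_combinations.append(combination)
--
--     new_combinations = []
--     for start in range(1, all_rows - new_rows):
--         for end in range(start + 1, all_rows - new_rows + 1):
--             combination = list(range(start, end))
--             if len(combination) < 3:
--                 continue
--             new_combinations.append(combination)
--
--     final_combinations = []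
--     for combination in all_combinations:
--         if combination not in new_combinations:
--             final_combinations.append(combination)
--
--     return final_combinations
-- ===== SOURCE B (Python) =====
-- def print_sequences(all_rows, new_rows):
--     bound = all_rows - new_rows
--     result = []
--     for start in range(1, all_rows):
--         for end in range(start + 3, all_rows + 1):
--             if end > bound:
--                 result.append(list(range(start, end)))
--     return result
-- ===== Notes on version B (the rewrite author's own statement) =====
-- stated objective: alternative
-- what changed: B drops A's second full enumeration of combinations and the list-membership scan over it, instead testing each (start, end) pair directly against the bound all_rows - new_rows in one nested pass.
import Mathlib
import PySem

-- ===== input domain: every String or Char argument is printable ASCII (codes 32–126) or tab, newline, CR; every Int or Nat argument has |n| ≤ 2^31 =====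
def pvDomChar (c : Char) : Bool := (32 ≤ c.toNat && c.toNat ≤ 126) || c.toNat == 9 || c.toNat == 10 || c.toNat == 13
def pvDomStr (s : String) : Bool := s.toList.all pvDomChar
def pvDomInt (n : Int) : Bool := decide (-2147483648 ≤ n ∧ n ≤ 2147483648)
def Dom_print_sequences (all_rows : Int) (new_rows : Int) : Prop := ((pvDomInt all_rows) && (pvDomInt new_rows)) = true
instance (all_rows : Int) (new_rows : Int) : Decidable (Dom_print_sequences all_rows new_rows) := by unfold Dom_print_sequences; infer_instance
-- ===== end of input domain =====

-- B replaces A's second enumeration plus membership scan over it by a direct bound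
-- test on each (start, end) pair in a single nested pass (objective: alternative).

-- ===== PORT A =====
def print_sequences (all_rows : Int) (new_rows : Int) : List (List Int) :=
  let all_combinations :=
    (PySem.List.pyRange 1 all_rows 1).foldl (fun acc start =>
      (PySem.List.pyRange (start + 1) (all_rows + 1) 1).foldl (fun acc2 e =>
        let combination := PySem.List.pyRange start e 1
        if combination.length < 3 then acc2 else acc2 ++ [combination]) acc) []
  let new_combinations :=
    (PySem.List.pyRange 1 (all_rows - new_rows) 1).foldl (fun acc start =>
      (PySem.List.pyRange (start + 1) (all_rows - new_rows + 1) 1).foldl (fun acc2 e =>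
        let combination := PySem.List.pyRange start e 1
        if combination.length < 3 then acc2 else acc2 ++ [combination]) acc) []
  all_combinations.foldl (fun acc c =>
    if c ∈ new_combinations then acc else acc ++ [c]) []

-- ===== PORT B =====
def print_sequences_alt (all_rows : Int) (new_rows : Int) : List (List Int) :=
  let bound := all_rows - new_rows
  (PySem.List.pyRange 1 all_rows 1).foldl (fun acc start =>
    (PySem.List.pyRange (start + 3) (all_rows + 1) 1).foldl (fun acc2 e =>
      if bound < e then acc2 ++ [PySem.List.pyRange start e 1] else acc2) acc) []

-- ===== PRECONDITION & SPEC =====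
def Spec_print_sequences (all_rows : Int) (new_rows : Int) (out : List (List Int)) : Prop := out = print_sequences_alt all_rows new_rows
instance (all_rows : Int) (new_rows : Int) (out : List (List Int)) : Decidable (Spec_print_sequences all_rows new_rows out) := by unfold Spec_print_sequences; infer_instance

-- ===== CLAIM (what is proved, stated in full; the proofs are below) =====
def Claim_equal_print_sequences : Prop := ∀ (all_rows : Int) (new_rows : Int), Dom_print_sequences all_rows new_rows → Spec_print_sequences all_rows new_rows (print_sequences all_rows new_rows)

-- ===== LEMMAS AND PROOFS =====

-- canonical value of A's (and B's) generator loops: for each valid start,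
-- the surviving ends are exactly range(start+3, M+1)
def pvCombs (M : Int) : List (List Int) :=
  (PySem.List.pyRange 1 M 1).flatMap (fun s =>
    (PySem.List.pyRange (s + 3) (M + 1) 1).map (fun e => PySem.List.pyRange s e 1))

theorem pv_filter_range (s b : Int) :
    (PySem.List.pyRange (s + 1) b 1).filter (fun e => decide (¬ (PySem.List.pyRange s e 1).length < 3)) =
      PySem.List.pyRange (s + 3) b 1 := by
  have hcong : (PySem.List.pyRange (s + 1) b 1).filter (fun e => decide (¬ (PySem.List.pyRange s e 1).length < 3)) =
      (PySem.List.pyRange (s + 1) b 1).filter (fun e => decide (s + 3 ≤ e)) := by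
    apply List.filter_congr
    intro e _
    simp [PySem.List.length_pyRange_one]
    omega
  rw [hcong]
  by_cases h : s + 3 ≤ b
  · rw [PySem.List.pyRange_one_append (s+1) (s+3) b (by omega) h, List.filter_append]
    have h1 : (PySem.List.pyRange (s+1) (s+3) 1).filter (fun e => decide (s + 3 ≤ e)) = [] := by
      rw [List.filter_eq_nil_iff]
      intro e he
      rw [PySem.List.mem_pyRange_one] at he
      simp; omega
    have h2 : (PySem.List.pyRange (s+3) b 1).filter (fun e => decide (s + 3 ≤ e)) = PySem.List.pyRange (s+3) b 1 := by
      rw [List.filter_eq_self]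
      intro e he
      rw [PySem.List.mem_pyRange_one] at he
      simp; omega
    rw [h1, h2, List.nil_append]
  · have hr : PySem.List.pyRange (s+3) b 1 = [] := PySem.List.pyRange_one_eq_nil (by omega)
    rw [hr, List.filter_eq_nil_iff]
    intro e he
    rw [PySem.List.mem_pyRange_one] at he
    simp; omega

theorem pv_gen_eq (M : Int) (init : List (List Int)) :
    (PySem.List.pyRange 1 M 1).foldl (fun acc start =>
      (PySem.List.pyRange (start + 1) (M + 1) 1).foldl (fun acc2 e =>
        if (PySem.List.pyRange start e 1).length < 3 then acc2
        else acc2 ++ [PySem.List.pyRange start e 1]) acc) init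
    = init ++ pvCombs M := by
  have hflip : ∀ (s : Int) (acc : List (List Int)),
      (PySem.List.pyRange (s + 1) (M + 1) 1).foldl (fun acc2 e =>
        if (PySem.List.pyRange s e 1).length < 3 then acc2
        else acc2 ++ [PySem.List.pyRange s e 1]) acc
      = acc ++ (PySem.List.pyRange (s + 3) (M + 1) 1).map (fun e => PySem.List.pyRange s e 1) := by
    intro s acc
    rw [← pv_filter_range s (M + 1),
        ← PySem.List.foldl_append_ite (p := fun e => ¬ (PySem.List.pyRange s e 1).length < 3)
          (f := fun e => PySem.List.pyRange s e 1)]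
    apply PySem.List.foldl_congr_mem
    intro acc2 e _
    simp only [PySem.List.length_pyRange_one]
    split_ifs <;> rfl
  calc (PySem.List.pyRange 1 M 1).foldl (fun acc start =>
      (PySem.List.pyRange (start + 1) (M + 1) 1).foldl (fun acc2 e =>
        if (PySem.List.pyRange start e 1).length < 3 then acc2
        else acc2 ++ [PySem.List.pyRange start e 1]) acc) init
      = (PySem.List.pyRange 1 M 1).foldl (fun acc s =>
          acc ++ (PySem.List.pyRange (s + 3) (M + 1) 1).map (fun e => PySem.List.pyRange s e 1)) init := by
        apply PySem.List.foldl_congr_mem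
        intro acc s hs2
        exact hflip s acc
    _ = init ++ pvCombs M := PySem.List.foldl_append_eq_flatMap _ _ _

theorem pv_range_inj {s e s' e' : Int} (h1 : s < e) (h2 : s' < e')
    (h : PySem.List.pyRange s e 1 = PySem.List.pyRange s' e' 1) : s = s' ∧ e = e' := by
  have hl := congrArg List.length h
  rw [PySem.List.length_pyRange_one, PySem.List.length_pyRange_one] at hl
  rw [PySem.List.pyRange_one_cons h1, PySem.List.pyRange_one_cons h2] at h
  have hs : s = s' := by injection h
  constructor
  · exact hs
  · omega

theorem pv_mem_combs (M s e : Int) (hs : 1 ≤ s) (he : s + 3 ≤ e) :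
    PySem.List.pyRange s e 1 ∈ pvCombs M ↔ e ≤ M := by
  unfold pvCombs
  simp only [List.mem_flatMap, List.mem_map, PySem.List.mem_pyRange_one]
  constructor
  · rintro ⟨s', ⟨hs1, hs2⟩, e', ⟨he1, he2⟩, heq⟩
    obtain ⟨rfl, rfl⟩ := pv_range_inj (by omega) (by omega) heq.symm
    omega
  · intro hM
    exact ⟨s, ⟨hs, by omega⟩, e, ⟨he, by omega⟩, rfl⟩

theorem pv_main (all_rows new_rows : Int) :
    print_sequences all_rows new_rows = print_sequences_alt all_rows new_rows := by
  simp only [print_sequences, print_sequences_alt]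
  rw [pv_gen_eq all_rows [], pv_gen_eq (all_rows - new_rows) [], List.nil_append, List.nil_append]
  have hL : (pvCombs all_rows).foldl (fun acc c =>
      if c ∈ pvCombs (all_rows - new_rows) then acc else acc ++ [c]) []
      = [] ++ (pvCombs all_rows).filter (fun c => decide (c ∉ pvCombs (all_rows - new_rows))) := by
    rw [← PySem.List.foldl_append_ite_eq_filter (p := fun c => c ∉ pvCombs (all_rows - new_rows))]
    apply PySem.List.foldl_congr_mem
    intro acc c _
    split_ifs <;> rfl
  rw [hL, List.nil_append]
  have hR : ∀ (s : Int) (acc : List (List Int)),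
      (PySem.List.pyRange (s + 3) (all_rows + 1) 1).foldl (fun acc2 e =>
        if all_rows - new_rows < e then acc2 ++ [PySem.List.pyRange s e 1] else acc2) acc
      = acc ++ ((PySem.List.pyRange (s + 3) (all_rows + 1) 1).filter
          (fun e => decide (all_rows - new_rows < e))).map (fun e => PySem.List.pyRange s e 1) := by
    intro s acc
    exact PySem.List.foldl_append_ite (p := fun e => all_rows - new_rows < e)
      (f := fun e => PySem.List.pyRange s e 1) _ _
  have hB : (PySem.List.pyRange 1 all_rows 1).foldl (fun acc start =>
      (PySem.List.pyRange (start + 3) (all_rows + 1) 1).foldl (fun acc2 e =>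
        if all_rows - new_rows < e then acc2 ++ [PySem.List.pyRange start e 1] else acc2) acc) []
      = (PySem.List.pyRange 1 all_rows 1).flatMap (fun s =>
          ((PySem.List.pyRange (s + 3) (all_rows + 1) 1).filter
            (fun e => decide (all_rows - new_rows < e))).map (fun e => PySem.List.pyRange s e 1)) := by
    calc (PySem.List.pyRange 1 all_rows 1).foldl (fun acc start =>
        (PySem.List.pyRange (start + 3) (all_rows + 1) 1).foldl (fun acc2 e =>
          if all_rows - new_rows < e then acc2 ++ [PySem.List.pyRange start e 1] else acc2) acc) []
        = (PySem.List.pyRange 1 all_rows 1).foldl (fun acc s =>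
            acc ++ ((PySem.List.pyRange (s + 3) (all_rows + 1) 1).filter
              (fun e => decide (all_rows - new_rows < e))).map (fun e => PySem.List.pyRange s e 1)) [] := by
          apply PySem.List.foldl_congr_mem
          intro acc s _
          exact hR s acc
      _ = _ := by rw [PySem.List.foldl_append_eq_flatMap, List.nil_append]
  rw [hB]
  rw [show pvCombs all_rows = (PySem.List.pyRange 1 all_rows 1).flatMap (fun s =>
        (PySem.List.pyRange (s + 3) (all_rows + 1) 1).map (fun e => PySem.List.pyRange s e 1)) from rfl,
      List.filter_flatMap]
  apply List.flatMap_congr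
  intro s hs
  rw [List.filter_map]
  congr 1
  apply List.filter_congr
  intro e he
  rw [PySem.List.mem_pyRange_one] at hs he
  simp only [Function.comp_apply]
  rw [decide_eq_decide, pv_mem_combs (all_rows - new_rows) s e hs.1 he.1]
  omega

-- ===== VERDICT (by name: the statement is the Claim_ definition above) =====
theorem print_sequences_spec : Claim_equal_print_sequences := by
  intro a n _
  exact pv_main a n
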